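-- pv_equiv track=rewrite | github.com/compmec/shapepy | src/shapepy/shape/boolean.py | extract_sequence
-- ===== SOURCE A (Python) =====
-- from typing import Iterable, Tuple, Union
--
-- def extract_sequence(
--     triplets: Iterable[Tuple[int, int, int]]
-- ) -> Union[None, Iterable[int]]:
--     """
--     This function extract sequences
--     """
--     triplets = tuple(triplets)
--     for i, triplet0 in enumerate(triplets):
--         sequence = [i]
--         lasttri = triplet0
--         while True:
--             if lasttri[2] == triplet0[1]:
--                 return tuple(sequence)
--             for j, tripletj in enumerate(triplets):
--                 if j in sequence:
--                     continue
--                 if tripletj[1] == lasttri[2]: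
--                     sequence.append(j)
--                     lasttri = tripletj
--                     break
--             else:
--                 break
--     return None
-- ===== SOURCE B (Python) =====
-- def extract_sequence(triplets):
--     """
--     This function extract sequences
--     """
--     triplets = tuple(triplets)
--     # One index pass: group triplet positions by middle value, in order.
--     index = {}
--     for j, t in enumerate(triplets):
--         index.setdefault(t[1], []).append((j, t))
--     for i, t0 in enumerate(triplets):
--         # Greedy chaining consumes each bucket front-to-back, so instead of a
--         # used-set we keep one monotone cursor per value: the consumed indices
--         # of a bucket are always exactly a prefix of it (plus possibly i).
--         seq = [i]
--         cur = t0[2]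
--         pos = {}
--         while True:
--             if cur == t0[1]:
--                 return tuple(seq)
--             bucket = index.get(cur, ())
--             k = pos.get(cur, 0)
--             if k < len(bucket) and bucket[k][0] == i:
--                 k += 1
--             if k >= len(bucket):
--                 break
--             j, t = bucket[k]
--             pos[cur] = k + 1
--             seq.append(j)
--             cur = t[2]
--     return None
-- ===== Notes on version B (the rewrite author's own statement) =====
-- stated objective: faster
-- what changed: Replaces A's per-step rescan of all triplets with a list-membership test by a one-pass grouping of triplets by middle value and one monotone cursor per value: consumed matches of a value always form a prefix of its bucket (apart from the start index, skipped at most once), so each chain step is O(1) with no membership test at all.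
import Mathlib
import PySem

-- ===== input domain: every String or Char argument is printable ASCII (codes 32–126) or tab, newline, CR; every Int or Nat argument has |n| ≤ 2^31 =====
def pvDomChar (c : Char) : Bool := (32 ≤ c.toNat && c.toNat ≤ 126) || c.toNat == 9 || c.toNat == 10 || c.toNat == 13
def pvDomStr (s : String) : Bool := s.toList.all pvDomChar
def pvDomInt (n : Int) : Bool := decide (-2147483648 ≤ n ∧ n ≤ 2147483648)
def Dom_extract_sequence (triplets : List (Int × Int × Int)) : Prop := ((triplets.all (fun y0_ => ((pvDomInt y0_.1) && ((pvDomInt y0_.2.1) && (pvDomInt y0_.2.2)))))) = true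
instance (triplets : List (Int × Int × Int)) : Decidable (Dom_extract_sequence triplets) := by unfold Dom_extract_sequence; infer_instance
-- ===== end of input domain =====

-- B groups the triplets by middle value once and chains with one monotone cursor per
-- value (consumed matches are a bucket prefix), instead of A's rescans (objective: faster).

-- ===== PORT A =====
-- inner 'for j, tripletj in enumerate(triplets): if j in sequence: continue; if tripletj[1] == lasttri[2]: …break / else: break'
def findA (seq : List Int) (t : Int) : List (Int × (Int × Int × Int)) → Option (Int × (Int × Int × Int))
  | [] => none
  | (j, tr) :: rest =>
    if j ∈ seq then findA seq t rest
    else if tr.2.1 = t then some (j, tr)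
    else findA seq t rest

-- the 'while True' loop; each iteration appends a fresh index, so fuel (= len+1) never runs out
def whileA (en : List (Int × (Int × Int × Int))) (t0 : Int × Int × Int) :
    Nat → List Int → (Int × Int × Int) → Option (List Int)
  | 0, _, _ => none
  | f + 1, seq, last =>
    if last.2.2 = t0.2.1 then some seq
    else match findA seq last.2.2 en with
      | none => none
      | some (j, tj) => whileA en t0 f (seq ++ [j]) tj

-- outer 'for i, triplet0 in enumerate(triplets)'
def outerA (en : List (Int × (Int × Int × Int))) : List (Int × (Int × Int × Int)) → Option (List Int)
  | [] => none
  | (i, t0) :: rest =>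
    match whileA en t0 (en.length + 1) [i] t0 with
    | some s => some s
    | none => outerA en rest

def extract_sequence (triplets : List (Int × Int × Int)) : Option (List Int) :=
  outerA (PySem.List.enumerate triplets) (PySem.List.enumerate triplets)

-- ===== PORT B =====
-- the 'while True' loop of Source B: bucket = index.get(cur, ()); k = pos.get(cur, 0);
-- 'if k < len(bucket) and bucket[k][0] == i: k += 1' is the Option test below;
-- 'if k >= len(bucket): break; j, t = bucket[k]' is the match on bucket[k]?
def whileB (idx : PySem.Dict Int (List (Int × (Int × Int × Int)))) (i : Int) (t0 : Int × Int × Int) :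
    Nat → List Int → Int → PySem.Dict Int Nat → Option (List Int)
  | 0, _, _, _ => none
  | f + 1, seq, cur, pos =>
    if cur = t0.2.1 then some seq
    else
      let bucket := idx.getD cur []
      let k0 := pos.getD cur 0
      let k := if bucket[k0]?.map Prod.fst = some i then k0 + 1 else k0
      match bucket[k]? with
      | none => none
      | some (j, t) => whileB idx i t0 f (seq ++ [j]) t.2.2 (pos.insert cur (k + 1))

-- outer 'for i, t0 in enumerate(triplets)'
def outerB (idx : PySem.Dict Int (List (Int × (Int × Int × Int)))) (n : Nat) :
    List (Int × (Int × Int × Int)) → Option (List Int)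
  | [] => none
  | (i, t0) :: rest =>
    match whileB idx i t0 (n + 1) [i] t0.2.2 PySem.Dict.empty with
    | some s => some s
    | none => outerB idx n rest

def extract_sequence_alt (triplets : List (Int × Int × Int)) : Option (List Int) :=
  let en := PySem.List.enumerate triplets
  -- index.setdefault(t[1], []).append((j, t))
  let idx := (en.map (fun e => (e.2.2.1, e))).foldl
      (fun d p => d.modify p.1 [] (· ++ [p.2])) PySem.Dict.empty
  outerB idx triplets.length en

-- ===== PRECONDITION & SPEC =====
def Spec_extract_sequence (triplets : List (Int × Int × Int)) (out : Option (List Int)) : Prop := out = extract_sequence_alt triplets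
instance (triplets : List (Int × Int × Int)) (out : Option (List Int)) : Decidable (Spec_extract_sequence triplets out) := by unfold Spec_extract_sequence; infer_instance

-- ===== CLAIM (what is proved, stated in full; the proofs are below) =====
def Claim_equal_extract_sequence : Prop := ∀ (triplets : List (Int × Int × Int)), Dom_extract_sequence triplets → Spec_extract_sequence triplets (extract_sequence triplets)

-- ===== LEMMAS AND PROOFS =====

-- A's scan restricted to the matching entries: first entry whose index is unused
def firstFree (seq : List Int) : List (Int × (Int × Int × Int)) → Option (Int × (Int × Int × Int))
  | [] => none
  | e :: rest => if e.1 ∈ seq then firstFree seq rest else some e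

theorem firstFree_filter_eq_findA (seq : List Int) (v : Int)
    (en : List (Int × (Int × Int × Int))) :
    firstFree seq (en.filter (fun e => e.2.2.1 == v)) = findA seq v en := by
  induction en with
  | nil => rfl
  | cons e rest ih =>
    obtain ⟨j, tr⟩ := e
    by_cases hv : tr.2.1 = v
    · simp only [findA, List.filter_cons, hv]
      simp [firstFree, ih]
    · simp only [findA, List.filter_cons]
      have hb : (((j, tr) : Int × (Int × Int × Int)).2.2.1 == v) = false := by simpa using hv
      rw [hb]
      simp [ih, hv]

-- B's cursor pick equals A's first-unused pick, given the prefix invariant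
theorem pick_eq (i : Int) (seq : List Int) (hi : i ∈ seq) :
    ∀ (b : List (Int × (Int × Int × Int))) (k : Nat),
      (b.map Prod.fst).Nodup →
      (∀ m, m < k → ∀ e, b[m]? = some e → e.1 ∈ seq) →
      (∀ m, k ≤ m → ∀ e, b[m]? = some e → e.1 ∈ seq → e.1 = i) →
      b[(if b[k]?.map Prod.fst = some i then k + 1 else k)]? = firstFree seq b := by
  intro b
  induction b with
  | nil => intro k _ _ _; simp [firstFree]
  | cons e rest ih =>
    intro k hnd h1 h2
    match k with
    | 0 =>
      by_cases hmem : e.1 ∈ seq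
      · have hei : e.1 = i := h2 0 (Nat.zero_le _) e rfl hmem
        simp only [firstFree, if_pos hmem]
        have hcond : ((e :: rest)[0]?.map Prod.fst = some i) := by simp [hei]
        rw [if_pos hcond]
        have hnr : (rest.map Prod.fst).Nodup := (List.nodup_cons.mp hnd).2
        have hini : i ∉ rest.map Prod.fst := by
          rw [← hei]; exact (List.nodup_cons.mp hnd).1
        have := ih 0 hnr (by intro m hm; omega)
          (by intro m _ e' he' hm; exact h2 (m + 1) (Nat.zero_le _) e' (by simpa using he') hm)
        rw [← this]
        have hcond2 : ¬ (rest[0]?.map Prod.fst = some i) := by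
          intro hc
          cases h0 : rest[0]? with
          | none => simp [h0] at hc
          | some e' =>
            have : e'.1 = i := by simp [h0] at hc; exact hc
            exact hini (this ▸ List.mem_map_of_mem (List.mem_of_getElem? h0))
        rw [if_neg hcond2]
        rfl
      · have hne : e.1 ≠ i := fun h => hmem (h ▸ hi)
        have hcond : ¬ ((e :: rest)[0]?.map Prod.fst = some i) := by
          simp [hne]
        rw [if_neg hcond]
        simp [firstFree, hmem]
    | k' + 1 =>
      have hmem : e.1 ∈ seq := h1 0 (Nat.succ_pos _) e rfl
      simp only [firstFree, if_pos hmem]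
      have hnr : (rest.map Prod.fst).Nodup := (List.nodup_cons.mp hnd).2
      have h1' : ∀ m, m < k' → ∀ e', rest[m]? = some e' → e'.1 ∈ seq := by
        intro m hm e' he'; exact h1 (m + 1) (by omega) e' (by simpa using he')
      have h2' : ∀ m, k' ≤ m → ∀ e', rest[m]? = some e' → e'.1 ∈ seq → e'.1 = i := by
        intro m hm e' he' hmem'; exact h2 (m + 1) (by omega) e' (by simpa using he') hmem'
      have := ih k' hnr h1' h2'
      rw [← this]
      have hsh : (e :: rest)[k' + 1]? = rest[k']? := by simp
      rw [hsh]
      split <;> simp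

-- an index determines its triplet inside a fst-nodup list
theorem eq_of_fst_nodup {en : List (Int × (Int × Int × Int))}
    (hnd : (en.map Prod.fst).Nodup) {a b : Int × (Int × Int × Int)}
    (ha : a ∈ en) (hb : b ∈ en) (hab : a.1 = b.1) : a = b := by
  induction en with
  | nil => cases ha
  | cons e rest ih =>
    have hnr := List.nodup_cons.mp hnd
    rcases List.mem_cons.mp ha with ha1 | ha1 <;> rcases List.mem_cons.mp hb with hb1 | hb1
    · rw [ha1, hb1]
    · subst ha1
      have : a.1 ∈ rest.map Prod.fst := by rw [hab]; exact List.mem_map_of_mem hb1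
      exact absurd this hnr.1
    · subst hb1
      have : b.1 ∈ rest.map Prod.fst := by rw [← hab]; exact List.mem_map_of_mem ha1
      exact absurd this hnr.1
    · exact ih hnr.2 ha1 hb1

-- positions in a fst-nodup list are determined by the index
theorem getElem?_inj_fst {b : List (Int × (Int × Int × Int))}
    (hnd : (b.map Prod.fst).Nodup) {m m' : Nat} {e e' : Int × (Int × Int × Int)}
    (hm : b[m]? = some e) (hm' : b[m']? = some e') (h : e.1 = e'.1) : m = m' := by
  have h1 : (b.map Prod.fst)[m]? = some e.1 := by simp [hm]
  have h2 : (b.map Prod.fst)[m']? = some e.1 := by simp [hm', h]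
  have hmlt : m < (b.map Prod.fst).length := by
    by_contra hc; rw [List.getElem?_eq_none (by omega)] at h1; cases h1
  have hmlt' : m' < (b.map Prod.fst).length := by
    by_contra hc; rw [List.getElem?_eq_none (by omega)] at h2; cases h2
  rw [List.getElem?_eq_getElem hmlt] at h1
  rw [List.getElem?_eq_getElem hmlt'] at h2
  exact (List.Nodup.getElem_inj_iff hnd).mp
    (by rw [Option.some.inj h1, Option.some.inj h2])

theorem whileB_eq_whileA (en : List (Int × (Int × Int × Int)))
    (hnd : (en.map Prod.fst).Nodup)
    (idx : PySem.Dict Int (List (Int × (Int × Int × Int))))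
    (hidx : ∀ v, idx.getD v [] = en.filter (fun e => e.2.2.1 == v))
    (i : Int) (t0 : Int × Int × Int) :
    ∀ (f : Nat) (seq : List Int) (pos : PySem.Dict Int Nat) (last : Int × Int × Int),
      i ∈ seq →
      (∀ v m e, m < pos.getD v 0 → (en.filter (fun x => x.2.2.1 == v))[m]? = some e → e.1 ∈ seq) →
      (∀ v m e, pos.getD v 0 ≤ m → (en.filter (fun x => x.2.2.1 == v))[m]? = some e → e.1 ∈ seq → e.1 = i) →
      whileB idx i t0 f seq last.2.2 pos = whileA en t0 f seq last := by
  intro f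
  induction f with
  | zero => intro _ _ _ _ _ _; rfl
  | succ f ih =>
    intro seq pos last hi h1 h2
    simp only [whileB, whileA]
    by_cases hstop : last.2.2 = t0.2.1
    · simp [hstop]
    · rw [if_neg hstop, if_neg hstop, hidx]
      have hpick := pick_eq i seq hi (en.filter (fun x => x.2.2.1 == last.2.2))
        (pos.getD last.2.2 0)
        (hnd.sublist (List.filter_sublist.map Prod.fst))
        (fun m hm e he => h1 last.2.2 m e hm he) (fun m hm e he => h2 last.2.2 m e hm he)
      rw [hpick, firstFree_filter_eq_findA]
      cases hfa : findA seq last.2.2 en with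
      | none => rfl
      | some jt =>
        obtain ⟨j, tj⟩ := jt
        -- names for the bucket, base cursor and chosen cursor
        have hk : (en.filter (fun x => x.2.2.1 == last.2.2))[
            (if (en.filter (fun x => x.2.2.1 == last.2.2))[pos.getD last.2.2 0]?.map Prod.fst
                = some i then pos.getD last.2.2 0 + 1 else pos.getD last.2.2 0)]?
            = some (j, tj) := by
          rw [hpick, firstFree_filter_eq_findA, hfa]
        generalize hkdef : (if (en.filter (fun x => x.2.2.1 == last.2.2))[pos.getD last.2.2 0]?.map
            Prod.fst = some i then pos.getD last.2.2 0 + 1 else pos.getD last.2.2 0) = k at hk ⊢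
        have hbnd : ((en.filter (fun x => x.2.2.1 == last.2.2)).map Prod.fst).Nodup :=
          hnd.sublist (List.filter_sublist.map Prod.fst)
        have hmemb : ((j, tj) : Int × (Int × Int × Int)) ∈
            en.filter (fun x => x.2.2.1 == last.2.2) := List.mem_of_getElem? hk
        have hmem_en : ((j, tj) : Int × (Int × Int × Int)) ∈ en := (List.mem_filter.mp hmemb).1
        have htjv : tj.2.1 = last.2.2 := by
          have := (List.mem_filter.mp hmemb).2; simpa using this
        have hk0le : pos.getD last.2.2 0 ≤ k := by
          rw [← hkdef]; split <;> omega
        have hji : j ≠ i := by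
          intro hji
          by_cases hskip : (en.filter (fun x => x.2.2.1 == last.2.2))[pos.getD last.2.2 0]?.map
              Prod.fst = some i
          · -- i sits at the base cursor and was skipped; j = i would repeat an index
            rw [if_pos hskip] at hkdef
            cases h0 : (en.filter (fun x => x.2.2.1 == last.2.2))[pos.getD last.2.2 0]? with
            | none => rw [h0] at hskip; cases hskip
            | some e0 =>
              have he0 : e0.1 = i := by rw [h0] at hskip; simpa using hskip
              have := getElem?_inj_fst hbnd hk h0 (by simp [he0, hji])
              omega
          · rw [if_neg hskip] at hkdef
            rw [← hkdef] at hk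
            exact hskip (by simp [hk, hji])
        apply ih (seq ++ [j]) (pos.insert last.2.2 (k + 1)) tj
        · exact List.mem_append_left _ hi
        · -- entries below the new cursor are all used
          intro w m e hm he
          rw [PySem.Dict.getD_insert] at hm
          by_cases hw : w = last.2.2
          · rw [if_pos hw] at hm
            rw [hw] at he
            rcases Nat.lt_succ_iff_lt_or_eq.mp hm with hm | hm
            · by_cases hm0 : m < pos.getD last.2.2 0
              · exact List.mem_append_left _ (h1 last.2.2 m e hm0 he)
              · -- m is the skipped base-cursor slot, holding i
                have hskip : (en.filter (fun x => x.2.2.1 == last.2.2))[pos.getD last.2.2 0]?.map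
                    Prod.fst = some i := by
                  by_contra hc
                  rw [if_neg hc] at hkdef; omega
                have hmeq : m = pos.getD last.2.2 0 := by
                  rw [if_pos hskip] at hkdef; omega
                rw [hmeq] at he
                rw [he] at hskip
                have : e.1 = i := by simpa using hskip
                exact List.mem_append_left _ (this ▸ hi)
            · rw [hm] at he
              rw [he] at hk
              cases hk
              exact List.mem_append_right _ (List.mem_singleton_self _)
          · rw [if_neg hw] at hm
            exact List.mem_append_left _ (h1 w m e hm he)
        · -- at or above the new cursor, a used index can only be i
          intro w m e hm he hmem
          rw [PySem.Dict.getD_insert] at hm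
          rcases List.mem_append.mp hmem with hmem | hmem
          · -- an old used index: the old invariant applies
            apply h2 w m e _ he hmem
            by_cases hw : w = last.2.2
            · rw [if_pos hw] at hm; rw [hw]; omega
            · rwa [if_neg hw] at hm
          · -- e.1 = j: impossible at position m by fst-uniqueness
            have hej : e.1 = j := List.mem_singleton.mp hmem
            have hmem_e : e ∈ en := (List.mem_filter.mp (List.mem_of_getElem? he)).1
            have heq : e = (j, tj) := eq_of_fst_nodup hnd hmem_e hmem_en hej
            subst heq
            by_cases hw : w = last.2.2
            · rw [if_pos hw] at hm
              rw [hw] at he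
              have := getElem?_inj_fst
                (hnd.sublist (List.filter_sublist.map Prod.fst)) he hk rfl
              omega
            · have hpred := (List.mem_filter.mp (List.mem_of_getElem? he)).2
              have htw : tj.2.1 = w := by simpa using hpred
              exact absurd (htw.symm.trans htjv) hw

theorem outerB_eq_outerA (en : List (Int × (Int × Int × Int)))
    (hnd : (en.map Prod.fst).Nodup)
    (idx : PySem.Dict Int (List (Int × (Int × Int × Int))))
    (hidx : ∀ v, idx.getD v [] = en.filter (fun e => e.2.2.1 == v)) :
    ∀ l : List (Int × (Int × Int × Int)), outerB idx en.length l = outerA en l := by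
  intro l
  induction l with
  | nil => rfl
  | cons e rest ih =>
    obtain ⟨i, t0⟩ := e
    simp only [outerB, outerA]
    rw [whileB_eq_whileA en hnd idx hidx i t0 (en.length + 1) [i] PySem.Dict.empty t0
      (by simp)
      (by intro v m e hm; simp [PySem.Dict.getD_empty] at hm)
      (by intro v m e _ _ hmem; simpa using hmem), ih]

-- the bucket for value v holds exactly the enumerated triplets with middle component v, in order
theorem bucket_getD (en : List (Int × (Int × Int × Int))) (v : Int) :
    ((en.map (fun e => (e.2.2.1, e))).foldl
        (fun d p => d.modify p.1 [] (· ++ [p.2])) PySem.Dict.empty).getD v []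
      = en.filter (fun e => e.2.2.1 == v) := by
  rw [PySem.Dict.getD_foldl_modify_append]
  simp [List.filter_map, Function.comp_def]

theorem nodup_fst_enumerate (l : List (Int × Int × Int)) :
    ((PySem.List.enumerate l).map Prod.fst).Nodup := by
  have := PySem.List.pairwise_lt_enumerate (xs := l) (s := 0)
  exact (this.map Prod.fst (by intro a b h; exact h)).imp (fun h => ne_of_lt h)

-- ===== VERDICT (by name: the statement is the Claim_ definition above) =====
theorem extract_sequence_spec : Claim_equal_extract_sequence := by
  intro triplets _
  unfold Spec_extract_sequence extract_sequence extract_sequence_alt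
  have hlen : triplets.length = (PySem.List.enumerate triplets).length := by
    simp [PySem.List.length_enumerate]
  rw [hlen]
  exact (outerB_eq_outerA _ (nodup_fst_enumerate triplets) _
    (fun v => bucket_getD _ v) _).symm
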